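-- pv_equiv track=rewrite | github.com/Vk-Demon/vk-code | ckcompany19.py | asort
-- ===== SOURCE A (Python) =====
-- def asort(l,k): # Given an array N, sort it in ascending order till it reaches kth elements and after that sort it in descending order.
--   for i in range(0,k):
--     for j in range(0,k):
--       if(l[i]<l[j]):
--         t=l[i]
--         l[i]=l[j]
--         l[j]=t
--   return l
-- ===== SOURCE B (Python) =====
-- def asort(l, k):
--     # Sort the first k elements ascending, in place (same list object as A mutates).
--     if k > 0:
--         l[:k] = sorted(l[:k])
--     return l
-- ===== Notes on version B (the rewrite author's own statement) =====
-- stated objective: faster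
-- what changed: Replaces the O(k^2) full-range compare-and-swap double loop with a single in-place slice assignment l[:k] = sorted(l[:k]) using the library sort.
import Mathlib
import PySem

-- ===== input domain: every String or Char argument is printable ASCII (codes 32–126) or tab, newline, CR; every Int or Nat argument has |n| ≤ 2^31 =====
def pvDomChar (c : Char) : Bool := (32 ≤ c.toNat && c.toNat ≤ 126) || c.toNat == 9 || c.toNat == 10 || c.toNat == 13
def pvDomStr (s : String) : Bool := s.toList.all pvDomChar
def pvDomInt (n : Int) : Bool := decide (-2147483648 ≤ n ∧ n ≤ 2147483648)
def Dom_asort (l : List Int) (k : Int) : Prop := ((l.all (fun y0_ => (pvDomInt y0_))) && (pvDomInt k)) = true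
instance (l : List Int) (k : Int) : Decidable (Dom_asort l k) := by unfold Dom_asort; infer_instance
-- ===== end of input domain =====

-- B replaces A's quadratic compare-and-swap double loop over the k-prefix by one library sort of that
-- prefix (l[:k] = sorted(l[:k])). Both Pythons mutate l in place and return the same object; the
-- equivalence proved here is about the return value.

-- ===== PORT A =====
-- one body of A's inner loop: if l[i] < l[j] then swap l[i], l[j]
-- (both indices are in range on every input admitted by Pre_asort, so getD 0 is exact there)
def pySwapStep (a : List Int) (i j : Nat) : List Int :=
  let li := a.getD i 0
  let lj := a.getD j 0
  if li < lj then (a.set i lj).set j li else a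

def asort (l : List Int) (k : Int) : List Int :=
  (List.range k.toNat).foldl
    (fun acc i => (List.range k.toNat).foldl (fun b j => pySwapStep b i j) acc) l

-- ===== PORT B =====
-- l[:k] = sorted(l[:k]) : the sorted k-slice followed by the untouched tail
def asort_alt (l : List Int) (k : Int) : List Int :=
  if 0 < k then
    PySem.List.sorted (PySem.List.slice l none (some k)) (fun x => x) false ++ l.drop k.toNat
  else l

-- ===== PRECONDITION & SPEC =====
-- Pre_ excludes exactly the inputs where A raises IndexError (k > len(l), where the loops index past
-- the end); A returns normally everywhere else.
def Pre_asort (l : List Int) (k : Int) : Prop := k ≤ (l.length : Int)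
instance (l : List Int) (k : Int) : Decidable (Pre_asort l k) := by unfold Pre_asort; infer_instance

def pvWitness_asort : List Int × Int := ([3, 1, 2], 2)

def Spec_asort (l : List Int) (k : Int) (out : List Int) : Prop := out = asort_alt l k
instance (l : List Int) (k : Int) (out : List Int) : Decidable (Spec_asort l k out) := by unfold Spec_asort; infer_instance

-- ===== CLAIM (what is proved, stated in full; the proofs are below) =====
def Claim_equal_asort : Prop := ∀ (l : List Int) (k : Int), Dom_asort l k → Pre_asort l k → Spec_asort l k (asort l k)

-- ===== LEMMAS AND PROOFS =====

-- Structural model of one sweep of A's carried element: walking the slots xs with carry v,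
-- swapping whenever v < slot; returns (final slots, final carry).
def innerIns : List Int → Int → (List Int × Int)
  | [], v => ([], v)
  | x :: xs, v =>
      if v < x then
        let p := innerIns xs x; (v :: p.1, p.2)
      else
        let p := innerIns xs v; (x :: p.1, p.2)
theorem getD_append_len (xs : List Int) (y : Int) (zs : List Int) :
    (xs ++ y :: zs).getD xs.length 0 = y := by
  simp [List.getD]
theorem set_append_len (xs : List Int) (y w : Int) (zs : List Int) :
    (xs ++ y :: zs).set xs.length w = xs ++ w :: zs := by
  induction xs with
  | nil => simp
  | cons a xs ih => simp [ih]

theorem phaseA (s : List Int) : ∀ (v : Int) (r done : List Int),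
    (List.range' done.length s.length).foldl
        (fun acc j => pySwapStep acc (done.length + s.length) j) (done ++ s ++ v :: r)
      = done ++ (innerIns s v).1 ++ (innerIns s v).2 :: r := by
  induction s with
  | nil => intro v r done; simp [innerIns]
  | cons x xs ih =>
    intro v r done
    have hrange : List.range' done.length (x :: xs).length
        = done.length :: List.range' (done.length + 1) xs.length := by
      simp [List.range'_succ]
    rw [hrange, List.foldl_cons]
    have hgi : (done ++ (x :: xs) ++ v :: r).getD (done.length + (x :: xs).length) 0 = v := by
      have h := getD_append_len (done ++ x :: xs) v r
      simpa using h
    have hgd : (done ++ (x :: xs) ++ v :: r).getD done.length 0 = x := by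
      have h := getD_append_len done x (xs ++ v :: r)
      simpa using h
    by_cases hvx : v < x
    · have hstep : pySwapStep (done ++ (x :: xs) ++ v :: r) (done.length + (x :: xs).length) done.length
          = done ++ v :: xs ++ x :: r := by
        simp only [pySwapStep, hgi, hgd, if_pos hvx]
        have h1 : (done ++ (x :: xs) ++ v :: r).set (done.length + (x :: xs).length) x
            = done ++ (x :: xs) ++ x :: r := by
          have h := set_append_len (done ++ x :: xs) v x r
          simpa using h
        rw [h1]
        have h2 : (done ++ (x :: xs) ++ x :: r).set done.length v
            = done ++ v :: (xs ++ x :: r) := by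
          have h := set_append_len done x v (xs ++ x :: r)
          simpa using h
        simpa using h2
      rw [hstep]
      have ihx := ih x r (done ++ [v])
      have harr : (done ++ [v]) ++ xs ++ x :: r = done ++ v :: xs ++ x :: r := by simp
      have hidx : (done ++ [v]).length = done.length + 1 := by simp
      rw [harr, hidx] at ihx
      have hsum : done.length + 1 + xs.length = done.length + (x :: xs).length := by
        simp; omega
      rw [hsum] at ihx
      rw [ihx]
      simp only [innerIns, if_pos hvx]
      simp
    · have hstep : pySwapStep (done ++ (x :: xs) ++ v :: r) (done.length + (x :: xs).length) done.length
          = done ++ (x :: xs) ++ v :: r := by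
        simp only [pySwapStep, hgi, hgd, if_neg hvx]
      rw [hstep]
      have ihx := ih v r (done ++ [x])
      have harr : (done ++ [x]) ++ xs ++ v :: r = done ++ (x :: xs) ++ v :: r := by simp
      have hidx : (done ++ [x]).length = done.length + 1 := by simp
      rw [harr, hidx] at ihx
      have hsum : done.length + 1 + xs.length = done.length + (x :: xs).length := by
        simp; omega
      rw [hsum] at ihx
      rw [ihx]
      simp only [innerIns, if_neg hvx]
      simp

theorem phaseC (r : List Int) : ∀ (w : Int) (pre mid : List Int),
    (List.range' (pre.length + 1 + mid.length) r.length).foldl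
        (fun acc j => pySwapStep acc pre.length j) (pre ++ w :: mid ++ r)
      = pre ++ (innerIns r w).2 :: mid ++ (innerIns r w).1 := by
  induction r with
  | nil => intro w pre mid; simp [innerIns]
  | cons x xs ih =>
    intro w pre mid
    have hrange : List.range' (pre.length + 1 + mid.length) (x :: xs).length
        = (pre.length + 1 + mid.length) :: List.range' (pre.length + 1 + mid.length + 1) xs.length := by
      simp [List.range'_succ]
    rw [hrange, List.foldl_cons]
    have hgi : (pre ++ w :: mid ++ x :: xs).getD pre.length 0 = w := by
      have h := getD_append_len pre w (mid ++ x :: xs)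
      simpa using h
    have hgj : (pre ++ w :: mid ++ x :: xs).getD (pre.length + 1 + mid.length) 0 = x := by
      have h := getD_append_len (pre ++ w :: mid) x xs
      have hl : (pre ++ w :: mid).length = pre.length + 1 + mid.length := by simp; omega
      rw [hl] at h
      simpa using h
    by_cases hwx : w < x
    · have hstep : pySwapStep (pre ++ w :: mid ++ x :: xs) pre.length (pre.length + 1 + mid.length)
          = pre ++ x :: mid ++ w :: xs := by
        simp only [pySwapStep, hgi, hgj, if_pos hwx]
        have h1 : (pre ++ w :: mid ++ x :: xs).set pre.length x
            = pre ++ x :: (mid ++ x :: xs) := by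
          have h := set_append_len pre w x (mid ++ x :: xs)
          simpa using h
        rw [h1]
        have h2 : ((pre ++ x :: mid) ++ x :: xs).set ((pre ++ x :: mid).length) w
            = (pre ++ x :: mid) ++ w :: xs := set_append_len _ _ _ _
        have hl : (pre ++ x :: mid).length = pre.length + 1 + mid.length := by simp; omega
        rw [hl] at h2
        have he : (pre ++ x :: mid) ++ x :: xs = pre ++ x :: (mid ++ x :: xs) := by simp
        rw [he] at h2
        rw [h2]
      rw [hstep]
      have ihx := ih x pre (mid ++ [w])
      have harr : pre ++ x :: (mid ++ [w]) ++ xs = pre ++ x :: mid ++ w :: xs := by simp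
      have hidx : pre.length + 1 + (mid ++ [w]).length = pre.length + 1 + mid.length + 1 := by
        simp only [List.length_append, List.length_cons, List.length_nil]; omega
      rw [harr, hidx] at ihx
      rw [ihx]
      simp only [innerIns, if_pos hwx]
      simp
    · have hstep : pySwapStep (pre ++ w :: mid ++ x :: xs) pre.length (pre.length + 1 + mid.length)
          = pre ++ w :: mid ++ x :: xs := by
        simp only [pySwapStep, hgi, hgj, if_neg hwx]
      rw [hstep]
      have ihx := ih w pre (mid ++ [x])
      have harr : pre ++ w :: (mid ++ [x]) ++ xs = pre ++ w :: mid ++ x :: xs := by simp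
      have hidx : pre.length + 1 + (mid ++ [x]).length = pre.length + 1 + mid.length + 1 := by
        simp only [List.length_append, List.length_cons, List.length_nil]; omega
      rw [harr, hidx] at ihx
      rw [ihx]
      simp only [innerIns, if_neg hwx]
      simp


theorem innerIns_length (xs : List Int) (v : Int) : (innerIns xs v).1.length = xs.length := by
  induction xs generalizing v with
  | nil => rfl
  | cons x xs ih => simp only [innerIns]; split <;> simp [ih]
theorem innerIns_perm (xs : List Int) (v : Int) :
    (v :: xs).Perm ((innerIns xs v).2 :: (innerIns xs v).1) := by
  induction xs generalizing v with
  | nil => simp [innerIns]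
  | cons x xs ih =>
    simp only [innerIns]
    split
    · -- (v :: x :: xs) ~ (carry :: v :: slots) where (x::xs) ~ carry::slots
      refine List.Perm.trans (List.Perm.cons v (ih x)) ?_
      exact List.Perm.swap _ _ _
    · refine List.Perm.trans (List.Perm.swap x v xs) ?_
      refine List.Perm.trans (List.Perm.cons x (ih v)) ?_
      exact List.Perm.swap _ _ _

theorem innerIns_self_le (xs : List Int) (v : Int) : v ≤ (innerIns xs v).2 := by
  induction xs generalizing v with
  | nil => simp [innerIns]
  | cons x xs ih =>
    simp only [innerIns]
    split
    · exact le_trans (le_of_lt ‹v < x›) (ih x)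
    · exact ih v

theorem innerIns_sorted (xs : List Int) (v : Int) (h : xs.Pairwise (· ≤ ·)) :
    ((innerIns xs v).1 ++ [(innerIns xs v).2]).Pairwise (· ≤ ·) := by
  induction xs generalizing v with
  | nil => simp [innerIns]
  | cons x xs ih =>
    rcases List.pairwise_cons.1 h with ⟨hx, hs⟩
    simp only [innerIns]
    split
    · refine List.pairwise_cons.2 ⟨?_, ih x hs⟩
      intro y hy
      have hmem : y ∈ (innerIns xs x).2 :: (innerIns xs x).1 := by
        rcases List.mem_append.1 hy with h1 | h1
        · exact List.mem_cons_of_mem _ h1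
        · simp at h1; subst h1; exact List.mem_cons_self
      have : y ∈ x :: xs := (innerIns_perm xs x).mem_iff.2 hmem
      rcases List.mem_cons.1 this with h1 | h1
      · subst h1; exact le_of_lt ‹v < y›
      · exact le_of_lt (lt_of_lt_of_le ‹v < x› (hx y h1))
    · refine List.pairwise_cons.2 ⟨?_, ih v hs⟩
      intro y hy
      have hmem : y ∈ (innerIns xs v).2 :: (innerIns xs v).1 := by
        rcases List.mem_append.1 hy with h1 | h1
        · exact List.mem_cons_of_mem _ h1
        · simp at h1; subst h1; exact List.mem_cons_self
      have : y ∈ v :: xs := (innerIns_perm xs v).mem_iff.2 hmem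
      rcases List.mem_cons.1 this with h1 | h1
      · subst h1; exact le_of_not_gt ‹¬ y < x›
      · exact hx y h1

theorem pySwapStep_length (a : List Int) (i j : Nat) : (pySwapStep a i j).length = a.length := by
  simp only [pySwapStep]; split <;> simp

theorem phaseB (q : List Int) (w : Int) (r : List Int) :
    pySwapStep (q ++ w :: r) q.length q.length = q ++ w :: r := by
  unfold pySwapStep
  simp

theorem range_split (i m : Nat) :
    List.range (i + 1 + m) = List.range' 0 i ++ (i :: List.range' (i + 1) m) := by
  rw [List.range_eq_range']
  have h : List.range' 0 i 1 ++ List.range' (0 + 1 * i) (1 + m) 1 = List.range' 0 (i + (1 + m)) 1 :=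
    List.range'_append
  simp at h
  rw [show i + 1 + m = i + (1 + m) by omega, ← h]
  congr 1
  rw [show 1 + m = m + 1 by omega, List.range'_succ]

theorem inner_pass (s : List Int) (v : Int) (r : List Int) :
    (List.range (s.length + 1 + r.length)).foldl
        (fun acc j => pySwapStep acc s.length j) (s ++ v :: r)
      = (innerIns s v).1 ++ (innerIns r (innerIns s v).2).2 :: (innerIns r (innerIns s v).2).1 := by
  rw [range_split, List.foldl_append, List.foldl_cons]
  have hA := phaseA s v r []
  simp only [List.length_nil, Nat.zero_add, List.nil_append] at hA
  rw [hA]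
  have hq : (innerIns s v).1.length = s.length := innerIns_length s v
  have hB : pySwapStep ((innerIns s v).1 ++ (innerIns s v).2 :: r) s.length s.length
      = (innerIns s v).1 ++ (innerIns s v).2 :: r := by
    rw [← hq]; exact phaseB _ _ _
  rw [hB]
  have hC := phaseC r (innerIns s v).2 (innerIns s v).1 []
  simp only [List.length_nil, List.nil_append, Nat.add_zero] at hC
  rw [hq] at hC
  simpa using hC

theorem swap_take (a : List Int) (i j n : Nat) (hi : i < n) (hj : j < n) (hn : n ≤ a.length) :
    pySwapStep (a.take n) i j = (pySwapStep a i j).take n ∧ (pySwapStep a i j).drop n = a.drop n := by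
  have hgi : (a.take n).getD i 0 = a.getD i 0 := by
    simp [List.getD, List.getElem?_take, hi]
  have hgj : (a.take n).getD j 0 = a.getD j 0 := by
    simp [List.getD, List.getElem?_take, hj]
  simp only [pySwapStep, hgi, hgj]
  split
  · constructor
    · rw [List.take_set, List.take_set]
    · rw [List.drop_set, List.drop_set]
      simp [hi, hj]
  · exact ⟨rfl, rfl⟩

theorem foldl_swap_length (js : List Nat) (i : Nat) : ∀ (b : List Int),
    (js.foldl (fun acc j => pySwapStep acc i j) b).length = b.length := by
  induction js with
  | nil => intro b; rfl
  | cons j js ih => intro b; rw [List.foldl_cons, ih, pySwapStep_length]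

theorem foldl_swap_split (js : List Nat) (i n : Nat) (hi : i < n) : ∀ (a : List Int),
    (∀ j ∈ js, j < n) → n ≤ a.length →
    js.foldl (fun acc j => pySwapStep acc i j) a
      = js.foldl (fun acc j => pySwapStep acc i j) (a.take n) ++ a.drop n := by
  induction js with
  | nil => intro a _ hn; simp [List.take_append_drop]
  | cons j js ih =>
    intro a hjs hn
    have hj : j < n := hjs j List.mem_cons_self
    obtain ⟨h1, h2⟩ := swap_take a i j n hi hj hn
    rw [List.foldl_cons, List.foldl_cons, h1]
    rw [ih (pySwapStep a i j) (fun x hx => hjs x (List.mem_cons_of_mem _ hx))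
        (by rw [pySwapStep_length]; exact hn), h2]

theorem foldl_split (is : List Nat) (n : Nat) : ∀ (a : List Int),
    (∀ i ∈ is, i < n) → n ≤ a.length →
    is.foldl (fun acc i => (List.range n).foldl (fun b j => pySwapStep b i j) acc) a
      = is.foldl (fun acc i => (List.range n).foldl (fun b j => pySwapStep b i j) acc) (a.take n)
        ++ a.drop n := by
  induction is with
  | nil => intro a _ hn; simp [List.take_append_drop]
  | cons i is ih =>
    intro a his hn
    have hi : i < n := his i List.mem_cons_self
    have hsplit := foldl_swap_split (List.range n) i n hi a (fun j hj => List.mem_range.1 hj) hn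
    rw [List.foldl_cons, List.foldl_cons, hsplit]
    have hlen : ((List.range n).foldl (fun b j => pySwapStep b i j) (a.take n)).length = n := by
      rw [foldl_swap_length, List.length_take]; omega
    have hlen2 : n ≤ (((List.range n).foldl (fun b j => pySwapStep b i j) (a.take n)) ++ a.drop n).length := by
      simp [hlen]
    rw [ih _ (fun x hx => his x (List.mem_cons_of_mem _ hx)) hlen2]
    congr 1
    · congr 1
      rw [List.take_append_of_le_length (by omega), List.take_of_length_le (by omega)]
    · rw [List.drop_append_of_le_length (by omega)]
      simp [hlen]

theorem innerIns_perm_append (xs : List Int) (v : Int) :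
    ((innerIns xs v).1 ++ [(innerIns xs v).2]).Perm (v :: xs) := by
  refine List.Perm.trans (List.perm_append_singleton _ _) ?_
  exact (innerIns_perm xs v).symm

theorem outer_fold (m : Nat) : ∀ (s r : List Int), r.length = m → s.Pairwise (· ≤ ·) →
    ((List.range' s.length m).foldl
        (fun acc i => (List.range (s.length + m)).foldl (fun b j => pySwapStep b i j) acc)
        (s ++ r)).Perm (s ++ r)
    ∧ ((List.range' s.length m).foldl
        (fun acc i => (List.range (s.length + m)).foldl (fun b j => pySwapStep b i j) acc)
        (s ++ r)).Pairwise (· ≤ ·) := by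
  induction m with
  | zero =>
    intro s r hr hs
    have : r = [] := List.length_eq_zero_iff.1 hr
    subst this
    simp only [List.range'_zero, List.foldl_nil]
    exact ⟨List.Perm.refl _, by simpa using hs⟩
  | succ m ih =>
    intro s r hr hs
    rcases r with _ | ⟨v, r'⟩
    · simp at hr
    have hr' : r'.length = m := by simpa using hr
    rw [List.range'_succ, List.foldl_cons]
    -- the first pass
    have hpass := inner_pass s v r'
    rw [show s.length + 1 + r'.length = s.length + (m + 1) by omega] at hpass
    set q := (innerIns s v).1 with hq
    set w := (innerIns s v).2 with hw
    set q' := (innerIns r' w).1 with hq'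
    set w' := (innerIns r' w).2 with hw'
    rw [hpass]
    -- the new sorted prefix
    have hql : q.length = s.length := innerIns_length s v
    have hq'l : q'.length = m := by rw [hq', innerIns_length]; exact hr'
    have hsorted_qw : (q ++ [w]).Pairwise (· ≤ ·) := innerIns_sorted s v hs
    have hww' : w ≤ w' := innerIns_self_le r' w
    have hsorted' : (q ++ [w']).Pairwise (· ≤ ·) := by
      rw [List.pairwise_append] at hsorted_qw ⊢
      refine ⟨hsorted_qw.1, by simp, ?_⟩
      intro a ha b hb
      simp at hb; subst hb
      exact le_trans (hsorted_qw.2.2 a ha w (by simp)) hww'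
    -- apply the IH to the new state
    have harr : q ++ w' :: q' = (q ++ [w']) ++ q' := by simp
    have ihx := ih (q ++ [w']) q' hq'l hsorted'
    have hlen1 : (q ++ [w']).length = s.length + 1 := by simp [hql]
    rw [hlen1] at ihx
    rw [show s.length + 1 + m = s.length + (m + 1) by omega] at ihx
    rw [harr]
    -- permutation chaining
    have hperm1 : ((q ++ [w']) ++ q').Perm (s ++ v :: r') := by
      have h1 : (w' :: q').Perm (w :: r') := (innerIns_perm r' w).symm
      have h2 : (q ++ w' :: q').Perm (q ++ w :: r') := List.Perm.append_left q h1
      have h3 : q ++ w :: r' = (q ++ [w]) ++ r' := by simp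
      have h4 : ((q ++ [w]) ++ r').Perm ((v :: s) ++ r') :=
        List.Perm.append_right r' (innerIns_perm_append s v)
      have h5 : ((v :: s) ++ r').Perm (s ++ v :: r') := by
        simpa using List.perm_middle.symm
      have e1 : (q ++ [w']) ++ q' = q ++ w' :: q' := by simp
      have h2' : (q ++ w' :: q').Perm ((q ++ [w]) ++ r') := h3 ▸ h2
      rw [e1]
      exact h2'.trans (h4.trans h5)
    exact ⟨List.Perm.trans ihx.1 hperm1, ihx.2⟩
theorem asort_eq (l : List Int) (k : Int) (hpre : k ≤ (l.length : Int)) :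
    asort l k = asort_alt l k := by
  by_cases hk : 0 < k
  · have hnl : k.toNat ≤ l.length := by omega
    unfold asort
    rw [foldl_split (List.range k.toNat) k.toNat l (fun i hi => List.mem_range.1 hi) hnl]
    have hpl : (l.take k.toNat).length = k.toNat := by rw [List.length_take]; omega
    have houter := outer_fold k.toNat [] (l.take k.toNat) hpl (by simp)
    simp only [List.length_nil, Nat.zero_add, List.nil_append] at houter
    rw [← List.range_eq_range'] at houter
    obtain ⟨hperm, hsort⟩ := houter
    have hsorted_eq := PySem.List.sorted_id_eq_of_perm_of_pairwise (l.take k.toNat) _ hperm hsort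
    unfold asort_alt
    rw [if_pos hk, PySem.List.slice_to l (le_of_lt hk), ← hsorted_eq]
  · have hk0 : k.toNat = 0 := Int.toNat_of_nonpos (le_of_not_gt hk)
    unfold asort asort_alt
    rw [if_neg hk, hk0]
    simp

-- ===== VERDICT (by name: the statement is the Claim_ definition above) =====
theorem asort_spec : Claim_equal_asort := by
  intro l k _ hpre
  unfold Spec_asort
  exact asort_eq l k hpre
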